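-- pv_equiv track=rewrite | github.com/pypi-data/pypi-mirror-382 | packages/nestful-wrapper/nestful_wrapper-0.1.7.tar.gz/nestful_wrapper-0.1.7/nestful/hypothesis_generator/cosim.py | split_variable_name
-- ===== SOURCE A (Python) =====
-- from typing import List
--
-- def split_camel_case(text: str) -> List[str]:
--     words: List[str] = []
--     current_word = ""
--
--     for i, char in enumerate(text):
--         if char.isupper() and i != 0:
--             words.append(current_word)
--             current_word = char
--         else:
--             current_word += char
--
--     words.append(current_word)
--     return words
--
-- def split_variable_name(name: str) -> List[str]:
--     name_without_whitespace = name.replace(" ", "")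
--     name_split_with_underscore = name_without_whitespace.split("_")
--
--     new_split: List[str] = []
--     for item in name_split_with_underscore:
--         de_camel_words = split_camel_case(item)
--         new_split.extend(de_camel_words)
--
--     return new_split
-- ===== SOURCE B (Python) =====
-- def split_variable_name(name: str) -> list:
--     # One fused linear scan instead of split('_') followed by a camel-split per piece.
--     name = name.replace(" ", "")
--     words = []
--     current = ""
--     at_start = True
--     for ch in name:
--         if ch == "_":
--             words.append(current)
--             current = ""
--             at_start = True
--         elif ch.isupper() and not at_start:
--             words.append(current)
--             current = ch
--             at_start = False
--         else:
--             current += ch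
--             at_start = False
--     words.append(current)
--     return words
-- ===== Notes on version B (the rewrite author's own statement) =====
-- stated objective: simpler
-- what changed: Replaces the split-on-underscore pass plus a per-piece camel-case splitter (with its index-based first-char test) by one fused linear scan that maintains the current word and an at-word-start flag.
import Mathlib
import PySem

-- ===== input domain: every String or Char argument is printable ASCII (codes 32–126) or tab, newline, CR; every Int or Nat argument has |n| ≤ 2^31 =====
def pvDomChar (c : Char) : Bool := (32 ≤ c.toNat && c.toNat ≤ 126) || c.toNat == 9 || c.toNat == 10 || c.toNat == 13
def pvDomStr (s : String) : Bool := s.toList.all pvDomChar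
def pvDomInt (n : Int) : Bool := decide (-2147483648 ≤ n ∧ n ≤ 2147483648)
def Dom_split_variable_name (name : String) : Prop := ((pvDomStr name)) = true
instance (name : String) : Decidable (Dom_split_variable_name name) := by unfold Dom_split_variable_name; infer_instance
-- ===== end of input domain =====

-- B fuses A's split-on-underscore pass and per-piece camel-case splitter into one linear scan (objective: simpler).


-- ===== PORT A =====
def split_camel_case (text : List Char) : List (List Char) :=
  let st := (PySem.List.enumerate text 0).foldl
    (fun (p : List (List Char) × List Char) ic =>
      if PySem.Chars.isupper ic.2 && (ic.1 != 0) then (p.1 ++ [p.2], [ic.2])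
      else (p.1, p.2 ++ [ic.2])) ([], [])
  st.1 ++ [st.2]

def split_variable_name (name : String) : List String :=
  let nw := PySem.Chars.replace name.toList [' '] []
  let parts := PySem.Chars.splitOn nw ['_']
  (parts.foldl (fun acc item => acc ++ split_camel_case item) []).map String.ofList

-- ===== PORT B =====
def split_variable_name_alt (name : String) : List String :=
  let nw := PySem.Chars.replace name.toList [' '] []
  let st := nw.foldl
    (fun (p : List (List Char) × List Char × Bool) c =>
      if c == '_' then (p.1 ++ [p.2.1], [], true)
      else if PySem.Chars.isupper c && !p.2.2 then (p.1 ++ [p.2.1], [c], false)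
      else (p.1, p.2.1 ++ [c], false)) ([], [], true)
  (st.1 ++ [st.2.1]).map String.ofList

-- ===== PRECONDITION & SPEC =====
def Spec_split_variable_name (name : String) (out : List String) : Prop := out = split_variable_name_alt name
instance (name : String) (out : List String) : Decidable (Spec_split_variable_name name out) := by unfold Spec_split_variable_name; infer_instance

-- ===== CLAIM (what is proved, stated in full; the proofs are below) =====
def Claim_equal_split_variable_name : Prop := ∀ (name : String), Dom_split_variable_name name → Spec_split_variable_name name (split_variable_name name)

-- ===== LEMMAS AND PROOFS =====

/-- Prepend `pre` to the first word of a word list. -/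
def mapHd (pre : List Char) : List (List Char) → List (List Char)
  | [] => [pre]
  | h :: t => (pre ++ h) :: t

/-- Common spec: word list of a scan; `s` = "at word start". -/
def fscan (s : Bool) : List Char → List (List Char)
  | [] => [[]]
  | c :: t =>
    if c == '_' then [] :: fscan true t
    else if PySem.Chars.isupper c && !s then [] :: mapHd [c] (fscan false t)
    else mapHd [c] (fscan false t)

/-- Simple recursion computing split on '_'. -/
def splitU : List Char → List (List Char)
  | [] => [[]]
  | c :: t => if c == '_' then [] :: splitU t else mapHd [c] (splitU t)

theorem mapHd_ne_nil (pre : List Char) (x : List (List Char)) : mapHd pre x ≠ [] := by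
  cases x <;> simp [mapHd]

theorem fscan_ne_nil (s : Bool) (l : List Char) : fscan s l ≠ [] := by
  cases l with
  | nil => simp [fscan]
  | cons c t =>
    simp only [fscan]
    split_ifs <;> first | exact fun h => mapHd_ne_nil [c] (fscan false t) h | simp

theorem splitU_ne_nil (l : List Char) : splitU l ≠ [] := by
  cases l with
  | nil => simp [splitU]
  | cons c t =>
    simp only [splitU]
    split_ifs <;> first | exact fun h => mapHd_ne_nil [c] (splitU t) h | simp

theorem mapHd_nil (x : List (List Char)) (h : x ≠ []) : mapHd [] x = x := by
  cases x with
  | nil => exact absurd rfl h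
  | cons a b => simp [mapHd]

theorem mapHd_mapHd (a b : List Char) (x : List (List Char)) :
    mapHd a (mapHd b x) = mapHd (a ++ b) x := by
  cases x <;> simp [mapHd]

theorem splitOn_go_eq (l : List Char) : ∀ (fuel : Nat) (cur : List Char) (acc : List (List Char)),
    l.length ≤ fuel →
    PySem.Chars.splitOn.go ['_'] fuel l cur acc = acc.reverse ++ mapHd cur.reverse (splitU l) := by
  induction l with
  | nil =>
    intro fuel cur acc _
    cases fuel <;> simp [PySem.Chars.splitOn.go, splitU, mapHd]
  | cons c t ih =>
    intro fuel cur acc hf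
    cases fuel with
    | zero => simp at hf
    | succ f =>
      by_cases hc : c = '_'
      · subst hc
        have hpre : (['_'] : List Char).isPrefixOf ('_' :: t) = true := by
          simp [List.isPrefixOf]
        rw [PySem.Chars.splitOn.go]
        simp only [hpre, if_true]
        have hdrop : List.drop (['_'] : List Char).length ('_' :: t) = t := rfl
        rw [hdrop, ih f [] (cur.reverse :: acc) (by simpa using Nat.le_of_succ_le_succ hf)]
        simp only [List.reverse_nil]
        rw [mapHd_nil _ (splitU_ne_nil t)]
        simp [splitU, mapHd]
      · have hpre : (['_'] : List Char).isPrefixOf (c :: t) = false := by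
          simp [List.isPrefixOf]
          intro h; exact hc h.symm
        rw [PySem.Chars.splitOn.go]
        simp only [hpre, Bool.false_eq_true, if_false]
        rw [ih f (c :: cur) acc (by simpa using Nat.le_of_succ_le_succ hf)]
        have hsu : splitU (c :: t) = mapHd [c] (splitU t) := by
          simp [splitU, hc]
        rw [hsu, mapHd_mapHd]
        simp

theorem splitOn_eq_splitU (l : List Char) : PySem.Chars.splitOn l ['_'] = splitU l := by
  rw [PySem.Chars.splitOn, splitOn_go_eq l (l.length + 1) [] [] (Nat.le_succ _)]
  simp [mapHd_nil _ (splitU_ne_nil l)]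

theorem camel_inv (t : List Char) : ∀ (ws : List (List Char)) (cur : List Char) (s : Int),
    1 ≤ s → '_' ∉ t →
    ((PySem.List.enumerate t s).foldl
      (fun (p : List (List Char) × List Char) ic =>
        if PySem.Chars.isupper ic.2 && (ic.1 != 0) then (p.1 ++ [p.2], [ic.2])
        else (p.1, p.2 ++ [ic.2])) (ws, cur)).1 ++
    [((PySem.List.enumerate t s).foldl
      (fun (p : List (List Char) × List Char) ic =>
        if PySem.Chars.isupper ic.2 && (ic.1 != 0) then (p.1 ++ [p.2], [ic.2])
        else (p.1, p.2 ++ [ic.2])) (ws, cur)).2] = ws ++ mapHd cur (fscan false t) := by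
  induction t with
  | nil => intro ws cur s _ _; simp [PySem.List.enumerate, mapHd, fscan]
  | cons c t ih =>
    intro ws cur s hs ht
    have hc : c ≠ '_' := by intro h; exact ht (by simp [h])
    have hc' : (c == '_') = false := by simp [hc]
    have ht' : '_' ∉ t := fun h => ht (by simp [h])
    rw [PySem.List.enumerate_cons]
    have hs0 : (s != 0) = true := by simp; omega
    simp only [List.foldl_cons, hs0, Bool.and_true]
    by_cases hu : PySem.Chars.isupper c = true
    · simp only [hu, if_true]
      rw [ih (ws ++ [cur]) [c] (s + 1) (by omega) ht']
      simp [fscan, hc', hu, mapHd]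
    · simp only [hu, Bool.false_eq_true, if_false]
      rw [ih ws (cur ++ [c]) (s + 1) (by omega) ht']
      simp [fscan, hc', hu, mapHd_mapHd]

theorem splitCamel_eq (p : List Char) (hp : '_' ∉ p) : split_camel_case p = fscan true p := by
  cases p with
  | nil => simp [split_camel_case, PySem.List.enumerate, fscan]
  | cons c t =>
    have hc : (c == '_') = false := by simp; rintro rfl; exact hp (by simp)
    have ht : '_' ∉ t := fun h => hp (by simp [h])
    simp only [split_camel_case, PySem.List.enumerate_cons, List.foldl_cons]
    have h0 : ((0 : Int) != 0) = false := rfl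
    simp only [h0, Bool.and_false, Bool.false_eq_true, if_false, List.nil_append, zero_add]
    rw [camel_inv t [] [c] 1 (by omega) ht]
    simp only [fscan, hc, Bool.false_eq_true, if_false, Bool.not_true, Bool.and_false,
      List.nil_append]

theorem fscan_append (p : List Char) (hp : '_' ∉ p) (rest : List Char) : ∀ (s : Bool),
    fscan s (p ++ '_' :: rest) = fscan s p ++ fscan true rest := by
  induction p with
  | nil => intro s; simp [fscan]
  | cons c t ih =>
    intro s
    have hc : (c == '_') = false := by simp; rintro rfl; exact hp (by simp)
    have ht : '_' ∉ t := fun h => hp (by simp [h])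
    simp only [List.cons_append, fscan, hc, Bool.false_eq_true, if_false]
    rw [ih ht]
    split_ifs with h
    · simp only [List.cons_append]
      cases hx : fscan false t with
      | nil => exact absurd hx (fscan_ne_nil _ _)
      | cons a b => simp [mapHd]
    · cases hx : fscan false t with
      | nil => exact absurd hx (fscan_ne_nil _ _)
      | cons a b => simp [mapHd]

theorem a_core (l : List Char) : ∀ (pre : List Char) (acc : List (List Char)), '_' ∉ pre →
    (mapHd pre (splitU l)).foldl (fun acc item => acc ++ split_camel_case item) acc
      = acc ++ fscan true (pre ++ l) := by
  induction l with
  | nil =>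
    intro pre acc hp
    simp [splitU, mapHd, splitCamel_eq pre hp]
  | cons c t ih =>
    intro pre acc hp
    by_cases hc : c = '_'
    · subst hc
      simp only [splitU, beq_self_eq_true, if_true, mapHd, List.append_nil, List.foldl_cons]
      rw [← mapHd_nil _ (splitU_ne_nil t), ih [] (acc ++ split_camel_case pre) (by simp)]
      rw [splitCamel_eq pre hp, fscan_append pre hp t]
      simp
    · have hc' : (c == '_') = false := by simp [hc]
      simp only [splitU, hc', Bool.false_eq_true, if_false, mapHd_mapHd]
      rw [ih (pre ++ [c]) acc (by simp [hp]; rintro rfl; exact hc rfl)]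
      simp

theorem b_core (l : List Char) : ∀ (res : List (List Char)) (cur : List Char) (s : Bool),
    (l.foldl
      (fun (p : List (List Char) × List Char × Bool) c =>
        if c == '_' then (p.1 ++ [p.2.1], [], true)
        else if PySem.Chars.isupper c && !p.2.2 then (p.1 ++ [p.2.1], [c], false)
        else (p.1, p.2.1 ++ [c], false)) (res, cur, s)).1 ++
    [(l.foldl
      (fun (p : List (List Char) × List Char × Bool) c =>
        if c == '_' then (p.1 ++ [p.2.1], [], true)
        else if PySem.Chars.isupper c && !p.2.2 then (p.1 ++ [p.2.1], [c], false)
        else (p.1, p.2.1 ++ [c], false)) (res, cur, s)).2.1] = res ++ mapHd cur (fscan s l) := by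
  induction l with
  | nil => intro res cur s; simp [fscan, mapHd]
  | cons c t ih =>
    intro res cur s
    simp only [List.foldl_cons]
    by_cases hc : (c == '_') = true
    · simp only [hc, if_true]
      rw [ih (res ++ [cur]) [] true, mapHd_nil _ (fscan_ne_nil _ _)]
      simp [fscan, hc, mapHd]
    · simp only [hc, Bool.false_eq_true, if_false]
      by_cases hu : (PySem.Chars.isupper c && !s) = true
      · simp only [hu, if_true]
        rw [ih (res ++ [cur]) [c] false]
        simp [fscan, hc, hu, mapHd]
      · simp only [hu, Bool.false_eq_true, if_false]
        rw [ih res (cur ++ [c]) false]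
        simp only [fscan, hc, Bool.false_eq_true, if_false, hu, mapHd_mapHd]

theorem core_eq (l : List Char) :
    (PySem.Chars.splitOn l ['_']).foldl (fun acc item => acc ++ split_camel_case item) []
      = (l.foldl
          (fun (p : List (List Char) × List Char × Bool) c =>
            if c == '_' then (p.1 ++ [p.2.1], [], true)
            else if PySem.Chars.isupper c && !p.2.2 then (p.1 ++ [p.2.1], [c], false)
            else (p.1, p.2.1 ++ [c], false)) ([], [], true)).1 ++
        [(l.foldl
          (fun (p : List (List Char) × List Char × Bool) c =>
            if c == '_' then (p.1 ++ [p.2.1], [], true)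
            else if PySem.Chars.isupper c && !p.2.2 then (p.1 ++ [p.2.1], [c], false)
            else (p.1, p.2.1 ++ [c], false)) ([], [], true)).2.1] := by
  rw [b_core l [] [] true, mapHd_nil _ (fscan_ne_nil _ _), splitOn_eq_splitU,
      show splitU l = mapHd [] (splitU l) from (mapHd_nil _ (splitU_ne_nil l)).symm,
      a_core l [] [] (by simp)]
  simp

-- ===== VERDICT (by name: the statement is the Claim_ definition above) =====
theorem split_variable_name_spec : Claim_equal_split_variable_name := by
  intro name _
  unfold Spec_split_variable_name split_variable_name split_variable_name_alt
  simp only []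
  rw [core_eq]
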